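-- pv_equiv track=rewrite | github.com/queelius/photo-memex | ptk/importers/arkiv.py | _sha256_from_photo_uri
-- ===== SOURCE A (Python) =====
-- from typing import Any, Dict, Optional
--
-- def _sha256_from_photo_uri(uri: Optional[str]) -> Optional[str]:
--     """Extract the sha256 from a ``photo-memex://photo/<sha256>`` URI."""
--     if not uri:
--         return None
--     prefix = "photo-memex://photo/"
--     if not uri.startswith(prefix):
--         return None
--     tail = uri[len(prefix):]
--     for sep in ("?", "#"):
--         idx = tail.find(sep)
--         if idx >= 0:
--             tail = tail[:idx]
--     return tail or None
-- ===== SOURCE B (Python) =====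
-- from typing import Optional
--
-- def _sha256_from_photo_uri(uri: Optional[str]) -> Optional[str]:
--     """Extract the sha256 from a ``photo-memex://photo/<sha256>`` URI."""
--     if not uri:
--         return None
--     prefix = "photo-memex://photo/"
--     if not uri.startswith(prefix):
--         return None
--     chars = []
--     for ch in uri[len(prefix):]:
--         if ch in "?#":
--             break
--         chars.append(ch)
--     return "".join(chars) or None
-- ===== Notes on version B (the rewrite author's own statement) =====
-- stated objective: simpler
-- what changed: B replaces A's two sequential find-and-truncate passes over the tail by a single character scan that stops at the first '?' or '#'.
import Mathlib
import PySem

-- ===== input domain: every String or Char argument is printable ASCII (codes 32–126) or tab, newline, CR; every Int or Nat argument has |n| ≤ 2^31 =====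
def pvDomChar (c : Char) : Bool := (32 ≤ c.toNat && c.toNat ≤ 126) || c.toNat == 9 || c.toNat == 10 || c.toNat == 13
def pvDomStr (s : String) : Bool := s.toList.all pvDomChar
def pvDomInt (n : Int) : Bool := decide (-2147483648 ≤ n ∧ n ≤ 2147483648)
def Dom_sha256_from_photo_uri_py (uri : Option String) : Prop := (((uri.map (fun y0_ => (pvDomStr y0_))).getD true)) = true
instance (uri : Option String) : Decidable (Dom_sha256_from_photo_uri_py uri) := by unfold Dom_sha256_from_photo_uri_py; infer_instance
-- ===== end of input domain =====

-- B replaces the prefix-strip plus two sequential find/truncate passes by a single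
-- character scan that stops at the first '?' or '#' (objective: simpler, one pass; no speed claim).

-- ===== PORT A =====
-- literal port: guard falsy uri, startswith check, tail = uri[len(prefix):],
-- then for sep in ("?", "#"): idx = tail.find(sep); if idx >= 0: tail = tail[:idx]
def sha256_from_photo_uri_py (uri : Option String) : Option String :=
  match uri with
  | none => none
  | some u =>
    if u = "" then none
    else
      let pre := "photo-memex://photo/"
      if !(PySem.Str.startswith u pre) then none
      else
        let tail0 := PySem.Str.slice u (some (PySem.Str.len pre)) none
        let tail :=
          ["?", "#"].foldl
            (fun t sep =>
              let idx := PySem.Str.find t sep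
              if 0 ≤ idx then PySem.Str.slice t none (some idx) else t)
            tail0
        if tail = "" then none else some tail

-- ===== PORT B =====
-- port of Source B's character loop with break: keep chars until the first '?' or '#'
def pvScanTail : List Char → List Char
  | [] => []
  | c :: rest => if c = '?' ∨ c = '#' then [] else c :: pvScanTail rest

def sha256_from_photo_uri_py_alt (uri : Option String) : Option String :=
  match uri with
  | none => none
  | some u =>
    if u = "" then none
    else
      let pre := "photo-memex://photo/"
      if !(PySem.Str.startswith u pre) then none
      else
        let kept := pvScanTail (PySem.Str.slice u (some (PySem.Str.len pre)) none).toList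
        if kept = [] then none else some (String.ofList kept)

-- ===== PRECONDITION & SPEC =====
def Spec_sha256_from_photo_uri_py (uri : Option String) (out : Option String) : Prop := out = sha256_from_photo_uri_py_alt uri
instance (uri : Option String) (out : Option String) : Decidable (Spec_sha256_from_photo_uri_py uri out) := by unfold Spec_sha256_from_photo_uri_py; infer_instance

-- ===== CLAIM (what is proved, stated in full; the proofs are below) =====
def Claim_equal_sha256_from_photo_uri_py : Prop := ∀ (uri : Option String), Dom_sha256_from_photo_uri_py uri → Spec_sha256_from_photo_uri_py uri (sha256_from_photo_uri_py uri)

-- ===== LEMMAS AND PROOFS =====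

-- one find/truncate pass of A equals takeWhile (· ≠ c)
theorem pvCut_eq_takeWhile (c : Char) (l : List Char) :
    (if 0 ≤ PySem.Chars.find l [c] then l.take (PySem.Chars.find l [c]).toNat else l)
      = l.takeWhile (fun x => !(x == c)) := by
  by_cases h : [c] <:+: l
  · have hpos : 0 ≤ PySem.Chars.find l [c] := (PySem.Chars.find_nonneg_iff l [c]).2 h
    rw [if_pos hpos]
    obtain ⟨hpre, hmin⟩ := PySem.Chars.find_spec hpos
    set n := (PySem.Chars.find l [c]).toNat with hn
    obtain ⟨t, ht⟩ := hpre
    have hget : l[n]? = some c := by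
      rw [← List.head?_drop, ← ht]; rfl
    have hlen : n < l.length := by
      rcases List.getElem?_eq_some_iff.1 hget with ⟨hlt, _⟩
      exact hlt
    have hgetc : l[n]'hlen = c := by
      have := List.getElem?_eq_some_iff.1 hget
      exact this.2
    rw [List.takeWhile_eq_take_findIdx_not]
    congr 1
    have hidx : List.findIdx (fun a => !!(a == c)) l = List.findIdx (fun a => a == c) l := by
      simp
    rw [hidx]
    set fi := List.findIdx (fun a => a == c) l with hfi
    -- n = findIdx (· == c) l by antisymmetry
    have h1 : fi ≤ n := by
      by_contra hlt'
      push Not at hlt'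
      have := List.not_of_lt_findIdx (p := fun a => a == c) (xs := l) (i := n) hlt'
      simp only [beq_eq_false_iff_ne] at this
      exact this hgetc
    have h2 : n ≤ fi := by
      by_contra hlt'
      push Not at hlt'
      have hfl : fi < l.length := lt_trans hlt' hlen
      have hp : (l[fi]'hfl) = c := by
        have := List.findIdx_getElem (p := fun a => a == c) (xs := l) (w := hfl)
        simpa [← hfi] using this
      apply hmin _ hlt'
      refine ⟨l.drop (fi + 1), ?_⟩
      have hd : l[fi]'hfl :: l.drop (fi + 1) = l.drop fi := List.getElem_cons_drop ..
      rw [← hd, hp]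
      rfl
    omega
  · have hneg : PySem.Chars.find l [c] = -1 := (PySem.Chars.find_eq_neg_one_iff l [c]).2 h
    rw [hneg]
    rw [if_neg (by norm_num)]
    symm
    rw [List.takeWhile_eq_self_iff]
    intro x hx
    simp only [Bool.not_eq_eq_eq_not, Bool.not_true, beq_eq_false_iff_ne]
    rintro rfl
    obtain ⟨s1, t1, hst⟩ := List.append_of_mem hx
    exact h ⟨s1, t1, by rw [hst]; simp⟩

theorem pvScanTail_eq_takeWhile (l : List Char) :
    pvScanTail l = l.takeWhile (fun x => !(x == '?') && !(x == '#')) := by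
  induction l with
  | nil => rfl
  | cons c rest ih =>
    by_cases h : c = '?' ∨ c = '#'
    · simp [pvScanTail, h, List.takeWhile_cons]
      rcases h with h | h <;> simp [h]
    · push Not at h
      simp only [pvScanTail, List.takeWhile_cons, ih]
      rw [if_neg (by tauto), if_pos (by simp [h.1, h.2])]

-- '?'-then-'#' takeWhile fusion
theorem pvTakeWhile_fuse (l : List Char) :
    (l.takeWhile (fun x => !(x == '?'))).takeWhile (fun x => !(x == '#'))
      = l.takeWhile (fun x => !(x == '?') && !(x == '#')) := by
  induction l with
  | nil => rfl
  | cons c rest ih =>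
    by_cases hq : c = '?'
    · simp [hq]
    · by_cases hh : c = '#'
      · simp [hh]
      · simp [hq, hh, ih]

-- one find/truncate pass of A at the String level
theorem pvStrCut_eq (s : String) (c : Char) (cs : String) (hcs : cs.toList = [c]) :
    (if 0 ≤ PySem.Str.find s cs then PySem.Str.slice s none (some (PySem.Str.find s cs)) else s).toList
      = s.toList.takeWhile (fun x => !(x == c)) := by
  by_cases hf : 0 ≤ PySem.Str.find s cs
  · rw [if_pos hf]
    have hf' : 0 ≤ PySem.Chars.find s.toList [c] := by
      rw [PySem.Str.find_eq, hcs] at hf; exact hf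
    rw [PySem.Str.toList_slice, PySem.Chars.slice_eq_listSlice, PySem.Str.find_eq, hcs,
      PySem.List.slice_to _ hf']
    have := pvCut_eq_takeWhile c s.toList
    rw [if_pos hf'] at this
    exact this
  · rw [if_neg hf]
    have hf' : ¬ 0 ≤ PySem.Chars.find s.toList [c] := by
      rw [PySem.Str.find_eq, hcs] at hf; exact hf
    have := pvCut_eq_takeWhile c s.toList
    rw [if_neg hf'] at this
    exact this

-- the common tail of both ports, for an arbitrary tail string t0
theorem pvEndgame (t0 : String) :
    (if List.foldl
          (fun t sep =>
            if 0 ≤ PySem.Str.find t sep then PySem.Str.slice t none (some (PySem.Str.find t sep)) else t)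
          t0 ["?", "#"] = "" then (none : Option String)
     else some (List.foldl
          (fun t sep =>
            if 0 ≤ PySem.Str.find t sep then PySem.Str.slice t none (some (PySem.Str.find t sep)) else t)
          t0 ["?", "#"]))
  = (if pvScanTail t0.toList = [] then none
     else some (String.ofList (pvScanTail t0.toList))) := by
  simp only [List.foldl_cons, List.foldl_nil]
  set t1 := (if 0 ≤ PySem.Str.find t0 "?" then PySem.Str.slice t0 none (some (PySem.Str.find t0 "?")) else t0) with ht1
  set t2 := (if 0 ≤ PySem.Str.find t1 "#" then PySem.Str.slice t1 none (some (PySem.Str.find t1 "#")) else t1) with ht2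
  have h1 : t1.toList = t0.toList.takeWhile (fun x => !(x == '?')) := by
    rw [ht1]; exact pvStrCut_eq t0 '?' "?" rfl
  have h2 : t2.toList = t0.toList.takeWhile (fun x => !(x == '?') && !(x == '#')) := by
    have h2' : t2.toList = t1.toList.takeWhile (fun x => !(x == '#')) := by
      rw [ht2]; exact pvStrCut_eq t1 '#' "#" rfl
    rw [h2', h1, pvTakeWhile_fuse]
  have hkept : pvScanTail t0.toList = t2.toList := by
    rw [pvScanTail_eq_takeWhile, h2]
  rw [hkept]
  by_cases he : t2 = ""
  · rw [if_pos he, if_pos (by rw [he]; rfl)]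
  · have hne : t2.toList ≠ [] := by
      intro hc
      apply he
      have h3 := congrArg String.ofList hc
      rw [String.ofList_toList] at h3
      exact h3.trans (by decide)
    rw [if_neg he, if_neg hne, String.ofList_toList]

-- ===== VERDICT (by name: the statement is the Claim_ definition above) =====
theorem sha256_from_photo_uri_py_spec : Claim_equal_sha256_from_photo_uri_py := by
  intro uri _
  show sha256_from_photo_uri_py uri = sha256_from_photo_uri_py_alt uri
  match uri with
  | none => rfl
  | some u =>
    simp only [sha256_from_photo_uri_py, sha256_from_photo_uri_py_alt]
    by_cases hz : u = ""
    · rw [if_pos hz, if_pos hz]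
    · rw [if_neg hz, if_neg hz]
      by_cases hs : PySem.Str.startswith u "photo-memex://photo/" = true
      · rw [hs]
        simp only [Bool.not_true, Bool.false_eq_true, if_false]
        generalize PySem.Str.slice u (some (PySem.Str.len "photo-memex://photo/")) none = t0
        exact pvEndgame t0
      · simp only [Bool.not_eq_true] at hs
        rw [hs]
        have hc : (!false) = true := by decide
        rw [if_pos hc, if_pos hc]
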